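-- pv_equiv track=rewrite | github.com/vjeyara/pm-job-fetcher | discover_companies.py | generate_slack_summary
-- ===== SOURCE A (Python) =====
-- def group_by_region(companies):
--     groups = {}
--     for name, region, category, why in companies:
--         groups.setdefault(region, []).append((name, category, why))
--     return groups
--
-- def region_emoji(region):
--     if region == "US":
--         return "🇺🇸"
--     if region == "Europe":
--         return "🇪🇺"
--     if region == "India":
--         return "🇮🇳"
--     return "🌐"
--
-- def generate_slack_summary(new_companies, week_str):
--     total = len(new_companies)
--     if total == 0:
--         return f"*Company Discovery — {week_str}*\n\nNo new companies to surface this week. You're fully up to date! 🎉"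
--
--     lines = [
--         f"*🔍 Company Discovery Digest — {week_str}*",
--         f"_{total} companies you haven't tracked yet_",
--         "",
--     ]
--
--     groups = group_by_region(new_companies)
--     for region in ["US", "Europe", "India"]:
--         companies = groups.get(region, [])
--         if not companies:
--             continue
--         emoji = region_emoji(region)
--         lines.append(f"*{emoji} {region}* ({len(companies)})")
--         for name, category, _ in sorted(companies, key=lambda x: x[0].lower()):
--             lines.append(f"  • {name} _{category}_")
--         lines.append("")
--
--     lines.append("_Add any company: `python3 add_companies.py \"Name\"`_")
--     return "\n".join(lines)
-- ===== SOURCE B (Python) =====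
-- def generate_slack_summary(new_companies, week_str):
--     total = len(new_companies)
--     if total == 0:
--         return f"*Company Discovery — {week_str}*\n\nNo new companies to surface this week. You're fully up to date! 🎉"
--     out = f"*🔍 Company Discovery Digest — {week_str}*\n_{total} companies you haven't tracked yet_\n\n"
--     for region, emoji in (("US", "🇺🇸"), ("Europe", "🇪🇺"), ("India", "🇮🇳")):
--         companies = [(n, c, w) for n, r, c, w in new_companies if r == region]
--         if companies:
--             out += f"*{emoji} {region}* ({len(companies)})\n"
--             for name, category, _ in sorted(companies, key=lambda x: x[0].lower()):
--                 out += f"  • {name} _{category}_\n"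
--             out += "\n"
--     return out + "_Add any company: `python3 add_companies.py \"Name\"`_"
-- ===== Notes on version B (the rewrite author's own statement) =====
-- stated objective: alternative
-- what changed: B drops the group_by_region dict entirely: it filters the input list once per fixed region and builds the message by direct string concatenation instead of accumulating a lines list and joining it at the end.
import Mathlib
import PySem

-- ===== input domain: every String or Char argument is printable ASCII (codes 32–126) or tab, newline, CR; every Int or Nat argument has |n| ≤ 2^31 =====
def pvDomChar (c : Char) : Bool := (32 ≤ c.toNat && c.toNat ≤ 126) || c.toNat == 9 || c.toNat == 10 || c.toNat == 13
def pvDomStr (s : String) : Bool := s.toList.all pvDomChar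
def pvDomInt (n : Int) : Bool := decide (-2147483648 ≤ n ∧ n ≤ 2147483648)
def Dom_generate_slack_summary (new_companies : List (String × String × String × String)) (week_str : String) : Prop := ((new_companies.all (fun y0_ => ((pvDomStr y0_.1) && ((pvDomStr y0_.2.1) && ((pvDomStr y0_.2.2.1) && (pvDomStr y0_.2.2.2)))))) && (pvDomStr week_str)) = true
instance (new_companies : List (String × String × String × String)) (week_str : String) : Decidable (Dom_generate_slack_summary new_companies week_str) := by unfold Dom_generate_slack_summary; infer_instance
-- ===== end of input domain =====

-- B drops the grouping dict: it filters the input once per fixed region and builds the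
-- output by direct string concatenation instead of a lines list joined at the end.

-- ===== PORT A =====
def group_by_region (companies : List (String × String × String × String)) :
    PySem.Dict String (List (String × String × String)) :=
  -- groups.setdefault(region, []).append(item)  ==  groups[region] = groups.get(region, []) + [item]
  companies.foldl (fun d x => d.modify x.2.1 [] (· ++ [(x.1, x.2.2.1, x.2.2.2)])) PySem.Dict.empty

def region_emoji (region : String) : String :=
  if region == "US" then "🇺🇸"
  else if region == "Europe" then "🇪🇺"
  else if region == "India" then "🇮🇳"
  else "🌐"

def generate_slack_summary (new_companies : List (String × String × String × String)) (week_str : String) : String :=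
  let total := new_companies.length
  if total = 0 then
    "*Company Discovery — " ++ week_str ++ "*\n\nNo new companies to surface this week. You're fully up to date! 🎉"
  else
    let lines : List String :=
      ["*🔍 Company Discovery Digest — " ++ week_str ++ "*",
       "_" ++ PySem.Int.toStr (total : Int) ++ " companies you haven't tracked yet_",
       ""]
    let groups := group_by_region new_companies
    let lines := ["US", "Europe", "India"].foldl (fun lines region =>
      let companies := groups.getD region []
      if companies = [] then lines
      else
        let lines := lines ++ ["*" ++ region_emoji region ++ " " ++ region ++ "* (" ++
          PySem.Int.toStr (companies.length : Int) ++ ")"]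
        let lines := (PySem.List.sorted companies (fun x => PySem.Str.lower x.1)).foldl
          (fun lines x => lines ++ ["  • " ++ x.1 ++ " _" ++ x.2.1 ++ "_"]) lines
        lines ++ [""]) lines
    PySem.Str.join "\n" (lines ++ ["_Add any company: `python3 add_companies.py \"Name\"`_"])

-- ===== PORT B =====
def generate_slack_summary_alt (new_companies : List (String × String × String × String)) (week_str : String) : String :=
  let total := new_companies.length
  if total = 0 then
    "*Company Discovery — " ++ week_str ++ "*\n\nNo new companies to surface this week. You're fully up to date! 🎉"
  else
    let out := "*🔍 Company Discovery Digest — " ++ week_str ++ "*\n_" ++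
      PySem.Int.toStr (total : Int) ++ " companies you haven't tracked yet_\n\n"
    let out := [("US", "🇺🇸"), ("Europe", "🇪🇺"), ("India", "🇮🇳")].foldl (fun out re =>
      let companies := (new_companies.filter (fun x => x.2.1 == re.1)).map
        (fun x => (x.1, x.2.2.1, x.2.2.2))
      if companies = [] then out
      else
        let out := out ++ ("*" ++ re.2 ++ " " ++ re.1 ++ "* (" ++
          PySem.Int.toStr (companies.length : Int) ++ ")\n")
        let out := (PySem.List.sorted companies (fun x => PySem.Str.lower x.1)).foldl
          (fun out x => out ++ ("  • " ++ x.1 ++ " _" ++ x.2.1 ++ "_\n")) out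
        out ++ "\n") out
    out ++ "_Add any company: `python3 add_companies.py \"Name\"`_"

-- ===== PRECONDITION & SPEC =====
def Spec_generate_slack_summary (new_companies : List (String × String × String × String)) (week_str : String) (out : String) : Prop := out = generate_slack_summary_alt new_companies week_str
instance (new_companies : List (String × String × String × String)) (week_str : String) (out : String) : Decidable (Spec_generate_slack_summary new_companies week_str out) := by unfold Spec_generate_slack_summary; infer_instance

-- ===== CLAIM (what is proved, stated in full; the proofs are below) =====
def Claim_equal_generate_slack_summary : Prop := ∀ (new_companies : List (String × String × String × String)) (week_str : String), Dom_generate_slack_summary new_companies week_str → Spec_generate_slack_summary new_companies week_str (generate_slack_summary new_companies week_str)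

-- ===== LEMMAS AND PROOFS =====

/-- The triples of `companies` whose region is `r`, in input order (B's comprehension). -/
def pvFilt (companies : List (String × String × String × String)) (r : String) :
    List (String × String × String) :=
  (companies.filter (fun x => x.2.1 == r)).map (fun x => (x.1, x.2.2.1, x.2.2.2))

/-- The Slack lines one region contributes (empty region ⇒ no lines). -/
def pvBlock (r e : String) (cs : List (String × String × String)) : List String :=
  if cs = [] then []
  else ("*" ++ e ++ " " ++ r ++ "* (" ++ PySem.Int.toStr (cs.length : Int) ++ ")") ::
    ((PySem.List.sorted cs (fun x => PySem.Str.lower x.1)).map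
      (fun x => "  • " ++ x.1 ++ " _" ++ x.2.1 ++ "_") ++ [""])

def sconcat : List String → String
  | [] => ""
  | a :: l => a ++ sconcat l

lemma getD_group (companies : List (String × String × String × String))
    (d : PySem.Dict String (List (String × String × String))) (r : String) :
    (companies.foldl (fun d x => d.modify x.2.1 [] (· ++ [(x.1, x.2.2.1, x.2.2.2)])) d).getD r []
      = d.getD r [] ++ pvFilt companies r := by
  induction companies generalizing d with
  | nil => simp [pvFilt]
  | cons x xs ih =>
    simp only [List.foldl_cons, ih, pvFilt, List.filter_cons]
    by_cases h : x.2.1 = r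
    · simp [h]
    · simp [h, PySem.Dict.getD_modify, Ne.symm h]

lemma sconcat_nil : sconcat [] = "" := rfl

lemma sconcat_cons (a : String) (l : List String) : sconcat (a :: l) = a ++ sconcat l := rfl

lemma sconcat_append (l₁ l₂ : List String) :
    sconcat (l₁ ++ l₂) = sconcat l₁ ++ sconcat l₂ := by
  induction l₁ with
  | nil => simp [sconcat_nil]
  | cons a l ih => simp [sconcat_cons, ih, String.append_assoc]

lemma join_cons_of_ne_nil (sep a : String) (rest : List String) (h : rest ≠ []) :
    PySem.Str.join sep (a :: rest) = a ++ sep ++ PySem.Str.join sep rest := by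
  cases rest with
  | nil => exact absurd rfl h
  | cons b t =>
    apply String.toList_inj.mp
    simp [PySem.Str.toList_join, PySem.Chars.join_cons_cons]

lemma join_eq_sconcat (ls : List String) (t : String) :
    PySem.Str.join "\n" (ls ++ [t]) = sconcat (ls.map (· ++ "\n")) ++ t := by
  induction ls with
  | nil =>
    apply String.toList_inj.mp
    simp [PySem.Str.toList_join, PySem.Chars.join_singleton, sconcat_nil]
  | cons a ls ih =>
    rw [List.cons_append, join_cons_of_ne_nil _ _ _ (by simp), ih]
    simp [List.map_cons, sconcat_cons, String.append_assoc]

/-- A's region step appends exactly the lines of `pvBlock`. -/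
lemma stepA (ls : List String) (r e : String) (cs : List (String × String × String)) :
    (if cs = [] then ls
     else ((PySem.List.sorted cs (fun x => PySem.Str.lower x.1)).foldl
        (fun lines x => lines ++ ["  • " ++ x.1 ++ " _" ++ x.2.1 ++ "_"])
        (ls ++ ["*" ++ e ++ " " ++ r ++ "* (" ++ PySem.Int.toStr (cs.length : Int) ++ ")"])) ++ [""])
      = ls ++ pvBlock r e cs := by
  by_cases h : cs = []
  · simp [h, pvBlock]
  · rw [if_neg h, PySem.List.foldl_append_singleton_eq_map]
    simp [pvBlock, h, List.append_assoc]

/-- B's region step appends exactly the concatenation of `pvBlock`'s lines (each + "\n"). -/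
lemma stepB (out : String) (r e : String) (cs : List (String × String × String)) :
    (if cs = [] then out
     else ((PySem.List.sorted cs (fun x => PySem.Str.lower x.1)).foldl
        (fun out x => out ++ ("  • " ++ x.1 ++ " _" ++ x.2.1 ++ "_\n"))
        (out ++ ("*" ++ e ++ " " ++ r ++ "* (" ++ PySem.Int.toStr (cs.length : Int) ++ ")\n"))) ++ "\n")
      = out ++ sconcat ((pvBlock r e cs).map (· ++ "\n")) := by
  by_cases h : cs = []
  · simp [h, pvBlock, sconcat_nil]
  · have key : ∀ (l : List (String × String × String)) (s : String),
        l.foldl (fun out x => out ++ ("  • " ++ x.1 ++ " _" ++ x.2.1 ++ "_\n")) s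
          = s ++ sconcat (l.map (fun x => ("  • " ++ x.1 ++ " _" ++ x.2.1 ++ "_") ++ "\n")) := by
      intro l
      induction l with
      | nil => intro s; simp [sconcat_nil]
      | cons a l ih =>
        intro s
        rw [List.foldl_cons, ih, List.map_cons, sconcat_cons]
        simp [String.append_assoc]
    rw [if_neg h, key]
    simp only [pvBlock, if_neg h, List.map_cons, List.map_append, List.map_map,
      sconcat_cons, sconcat_append, Function.comp_def]
    simp only [List.map_nil, sconcat_nil, String.append_assoc, String.empty_append,
      String.append_empty]
    rfl

-- ===== VERDICT (by name: the statement is the Claim_ definition above) =====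
theorem generate_slack_summary_spec : Claim_equal_generate_slack_summary := by
  intro ncs ws _
  show generate_slack_summary ncs ws = generate_slack_summary_alt ncs ws
  by_cases h : ncs.length = 0
  · simp [generate_slack_summary, generate_slack_summary_alt, h]
  · unfold generate_slack_summary generate_slack_summary_alt
    rw [if_neg h, if_neg h]
    simp only [List.foldl_cons, List.foldl_nil, group_by_region]
    have hg : ∀ r, ((ncs.foldl (fun d x => d.modify x.2.1 [] (· ++ [(x.1, x.2.2.1, x.2.2.2)]))
        PySem.Dict.empty).getD r []) = pvFilt ncs r := by
      intro r; rw [getD_group]; simp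
    simp only [hg]
    have he1 : region_emoji "US" = "🇺🇸" := rfl
    have he2 : region_emoji "Europe" = "🇪🇺" := rfl
    have he3 : region_emoji "India" = "🇮🇳" := rfl
    simp only [he1, he2, he3]
    rw [stepA, stepA, stepA, stepB, stepB, stepB, join_eq_sconcat]
    simp only [pvFilt, List.map_append, sconcat_append, List.map_cons, List.map_nil,
      sconcat_cons, sconcat_nil, String.append_assoc, String.append_empty, String.empty_append]
    rfl
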